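-- pv_equiv track=rewrite | github.com/Darkhunter9/python | Simplification.py | dealplus
-- ===== SOURCE A (Python) =====
-- def dealplus(expr):
--     tempexpr = expr
--     temp = ''
--     calculatelist = []
--
--     while (tempexpr or temp):
--         if (not tempexpr) and temp:
--             calculatelist.append(temp)
--             temp = ''
--         elif tempexpr[0] in '-+' and temp and temp.count('(') == temp.count(')'):
--             calculatelist.append(temp)
--             temp = ''
--         else:
--             temp += tempexpr[0]
--             tempexpr = tempexpr[1:]
--
--     for i in range(len(calculatelist)):
--         if not calculatelist[i][0] in '-+':
--             calculatelist[i] = '+'+calculatelist[i]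
--
--     return calculatelist
-- ===== SOURCE B (Python) =====
-- def dealplus(expr):
--     terms = []
--     cur = []
--     depth = 0
--     for c in expr:
--         if cur and depth == 0 and c in '+-':
--             terms.append(''.join(cur))
--             cur = []
--         cur.append(c)
--         if c == '(':
--             depth += 1
--         elif c == ')':
--             depth -= 1
--     if cur:
--         terms.append(''.join(cur))
--     return [t if t[0] in '+-' else '+' + t for t in terms]
-- ===== Notes on version B (the rewrite author's own statement) =====
-- stated objective: faster
-- what changed: Replaces the char-by-char string-slicing while-loop that recounts both parenthesis kinds over the accumulated prefix at every character with a single pass keeping a running parenthesis-depth counter, plus a comprehension for the sign prefixing.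
import Mathlib
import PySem

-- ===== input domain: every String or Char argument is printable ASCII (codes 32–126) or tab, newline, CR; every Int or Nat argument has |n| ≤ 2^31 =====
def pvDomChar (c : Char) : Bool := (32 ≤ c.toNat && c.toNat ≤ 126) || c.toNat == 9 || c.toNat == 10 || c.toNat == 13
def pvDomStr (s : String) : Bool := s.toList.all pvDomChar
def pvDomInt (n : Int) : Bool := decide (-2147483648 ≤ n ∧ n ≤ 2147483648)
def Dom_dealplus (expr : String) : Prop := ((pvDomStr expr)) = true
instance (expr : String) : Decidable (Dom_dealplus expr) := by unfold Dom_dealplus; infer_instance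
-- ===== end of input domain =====

-- B replaces A's quadratic recount-and-slice loop with one linear pass keeping a running parenthesis depth (faster).

-- ===== PORT A =====
-- Python's while loop: state (tempexpr, temp, calculatelist); branch order as in A.
def dealplusLoop (tempexpr temp : List Char) (acc : List (List Char)) : List (List Char) :=
  match tempexpr, temp with
  | [], [] => acc
  | [], t :: ts => dealplusLoop [] [] (acc ++ [t :: ts])
  | c :: rest, temp =>
    if (c = '-' ∨ c = '+') ∧ temp ≠ [] ∧ temp.count '(' = temp.count ')'
    then dealplusLoop (c :: rest) [] (acc ++ [temp])
    else dealplusLoop rest (temp ++ [c]) acc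
termination_by 2 * tempexpr.length + (if temp = [] then 0 else 1)
decreasing_by
  all_goals simp_all
  all_goals split <;> simp_all
  all_goals omega

-- Python's final index loop: prefix '+' when the first char is not '-'/'+' (elements are never empty).
def dealplusFix : List (List Char) → List (List Char)
  | [] => []
  | t :: ts => (if ¬(t.head? = some '-' ∨ t.head? = some '+') then '+' :: t else t) :: dealplusFix ts

def dealplus (expr : String) : List String :=
  (dealplusFix (dealplusLoop expr.toList [] [])).map String.ofList

-- ===== PORT B =====
def dealplusAltLoop : List Char → List Char → Int → List (List Char) → List (List Char)
  | [], cur, _, terms => if cur = [] then terms else terms ++ [cur]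
  | c :: rest, cur, depth, terms =>
    let p : List (List Char) × List Char :=
      if cur ≠ [] ∧ depth = 0 ∧ (c = '+' ∨ c = '-') then (terms ++ [cur], []) else (terms, cur)
    dealplusAltLoop rest (p.2 ++ [c])
      (if c = '(' then depth + 1 else if c = ')' then depth - 1 else depth) p.1

def dealplus_alt (expr : String) : List String :=
  (dealplusAltLoop expr.toList [] 0 []).map
    (fun t => String.ofList (if t.head? = some '+' ∨ t.head? = some '-' then t else '+' :: t))

-- ===== PRECONDITION & SPEC =====
def Spec_dealplus (expr : String) (out : List String) : Prop := out = dealplus_alt expr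
instance (expr : String) (out : List String) : Decidable (Spec_dealplus expr out) := by unfold Spec_dealplus; infer_instance

-- ===== CLAIM (what is proved, stated in full; the proofs are below) =====
def Claim_equal_dealplus : Prop := ∀ (expr : String), Dom_dealplus expr → Spec_dealplus expr (dealplus expr)

-- ===== LEMMAS AND PROOFS =====

lemma loop_eq (rest : List Char) : ∀ (temp : List Char) (acc : List (List Char)),
    dealplusLoop rest temp acc
      = dealplusAltLoop rest temp ((temp.count '(' : Int) - (temp.count ')' : Int)) acc := by
  induction rest with
  | nil =>
    intro temp acc
    cases temp with
    | nil => simp [dealplusLoop, dealplusAltLoop]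
    | cons t ts => simp [dealplusLoop, dealplusAltLoop]
  | cons c rest ih =>
    intro temp acc
    by_cases h : (c = '-' ∨ c = '+') ∧ temp ≠ [] ∧ temp.count '(' = temp.count ')'
    · have hc : ¬ (c = '(' ) ∧ ¬ (c = ')') := by
        rcases h.1 with h1 | h1 <;> subst h1 <;> exact ⟨by decide, by decide⟩
      have hd : ((temp.count '(' : Int) - (temp.count ')' : Int)) = 0 := by
        have := h.2.2; omega
      rw [dealplusLoop, if_pos h, dealplusLoop, if_neg (by simp)]
      rw [dealplusAltLoop]
      simp only [hd]
      rw [if_pos ⟨h.2.1, by trivial, h.1.symm⟩]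
      simp only [hc.1, hc.2, if_false, List.nil_append]
      rw [ih]
      simp [hc.1, hc.2]
    · have hd : ¬ (temp ≠ [] ∧ ((temp.count '(' : Int) - (temp.count ')' : Int)) = 0 ∧ (c = '+' ∨ c = '-')) := by
        intro ⟨h1, h2, h3⟩
        exact h ⟨h3.symm, h1, by omega⟩
      rw [dealplusLoop, if_neg h, dealplusAltLoop]
      rw [if_neg hd]
      rw [ih]
      congr 1
      simp [List.count_append, List.count_cons]
      by_cases h1 : c = '(' <;> by_cases h2 : c = ')' <;> simp_all <;> omega

lemma fix_eq (l : List (List Char)) :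
    dealplusFix l
      = l.map (fun t => if t.head? = some '+' ∨ t.head? = some '-' then t else '+' :: t) := by
  induction l with
  | nil => rfl
  | cons t ts ih =>
    simp only [dealplusFix, List.map_cons, ih]
    congr 1
    by_cases h : t.head? = some '-' ∨ t.head? = some '+'
    · rw [if_neg (by tauto), if_pos (by tauto)]
    · rw [if_pos (by tauto), if_neg (by tauto)]

-- ===== VERDICT (by name: the statement is the Claim_ definition above) =====
theorem dealplus_spec : Claim_equal_dealplus := by
  intro expr _
  unfold Spec_dealplus dealplus dealplus_alt
  rw [fix_eq]
  have := loop_eq expr.toList [] []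
  simp only [List.count_nil, Nat.cast_zero, sub_zero] at this
  rw [this, List.map_map]
  rfl
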